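-- pv_equiv track=rewrite | github.com/HubertJan/kattis-solutions | t9spelling/t9spelling-solution.py | convert
-- ===== SOURCE A (Python) =====
-- import string
--
-- def convert(input):
--     mapping = [2] * 3 + [3] * 3 + [4] * 3 + [5] * 3 +  [6] * 3+ [7] * 4 + [8] * 3 + [9] * 4
--     output = ""
--     for c in input:
--         if c == " ":
--             if len(output) != 0 and output[len(output) - 1] == "0":
--                 output += " "
--             output += "0"
--             continue
--         if not c.isalpha():
--             continue
--         index = string.ascii_lowercase.index(c)
--         letters = f"{mapping[index]}"
--         if len(output) != 0 and output[len(output) - 1] == letters: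
--             output += " "
--         for i in range(index - 1, -1, -1):
--             if mapping[index]  == mapping[i]:
--                 letters += f"{mapping[index]}"
--             else:
--                 break
--         output += f"{letters}"
--     return output
-- ===== SOURCE B (Python) =====
-- import string
--
-- _GROUPS = ["abc", "def", "ghi", "jkl", "mno", "pqrs", "tuv", "wxyz"]
-- _TABLE = {" ": "0"}
-- for _d, _g in enumerate(_GROUPS, start=2):
--     for _k, _ch in enumerate(_g):
--         _TABLE[_ch] = str(_d) * (_k + 1)
--
-- def convert(input):
--     parts = []
--     last = ""
--     for c in input:
--         token = _TABLE.get(c)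
--         if token is None:
--             continue
--         if last == token[0]:
--             parts.append(" ")
--         parts.append(token)
--         last = token[-1]
--     return "".join(parts)
-- ===== Notes on version B (the rewrite author's own statement) =====
-- stated objective: simpler
-- what changed: A recomputes each letter's key presses with a backward scan over the digit-group array and repeated string concatenation with two separate pause rules; B builds a 27-entry press table once, then makes a single pass appending table tokens to a list (joined at the end) with one unified pause rule (pause iff the previous press equals the token's first press).
-- crash fix: A raises ValueError on any input containing an ASCII uppercase letter (string.ascii_lowercase.index fails); B skips such characters and returns the conversion of the remaining text. — e.g. on convert("Hi"): A raises ValueError, B returns "444"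
import Mathlib
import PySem

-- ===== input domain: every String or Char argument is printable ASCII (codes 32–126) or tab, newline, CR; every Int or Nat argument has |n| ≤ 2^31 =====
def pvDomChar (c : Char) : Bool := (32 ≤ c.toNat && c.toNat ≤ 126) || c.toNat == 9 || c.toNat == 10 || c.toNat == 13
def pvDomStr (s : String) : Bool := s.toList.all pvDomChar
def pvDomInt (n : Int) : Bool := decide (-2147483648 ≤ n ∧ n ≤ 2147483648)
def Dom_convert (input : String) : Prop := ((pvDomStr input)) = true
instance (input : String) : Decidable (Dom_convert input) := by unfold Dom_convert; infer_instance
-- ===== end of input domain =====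

set_option maxRecDepth 8000

-- B replaces A's per-letter backward scan by a 27-entry press table built once and a
-- single pass with one unified pause rule (objective: simpler).

-- ===== PORT A =====
def mappingA : List Nat :=
  List.replicate 3 2 ++ List.replicate 3 3 ++ List.replicate 3 4 ++ List.replicate 3 5 ++
  List.replicate 3 6 ++ List.replicate 4 7 ++ List.replicate 3 8 ++ List.replicate 4 9

def asciiLower : List Char := "abcdefghijklmnopqrstuvwxyz".toList

-- the inner 'for i in range(index-1, -1, -1)' loop of A: k counts down from index
def innerA (d : Nat) : Nat → List Char
  | 0 => []
  | k + 1 => if mappingA.getD k 0 = d then Nat.digitChar d :: innerA d k else []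

def stepA (out : List Char) (c : Char) : List Char :=
  if c = ' ' then
    (if out.length ≠ 0 ∧ PySem.List.pyGet? out ((out.length : Int) - 1) = some '0'
     then out ++ [' '] else out) ++ ['0']
  else if PySem.Chars.isalpha c = false then out
  else
    match PySem.List.index? asciiLower c with
    | none => out   -- Python raises ValueError here; excluded by Pre_convert
    | some index =>
      (if out.length ≠ 0 ∧ PySem.List.pyGet? out ((out.length : Int) - 1)
            = some (Nat.digitChar (mappingA.getD index 0))
       then out ++ [' '] else out)
      ++ (Nat.digitChar (mappingA.getD index 0) :: innerA (mappingA.getD index 0) index)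

def convert (input : String) : String := String.mk (input.toList.foldl stepA [])

-- ===== PORT B =====
def groupsB : List (List Char) :=
  ["abc".toList, "def".toList, "ghi".toList, "jkl".toList,
   "mno".toList, "pqrs".toList, "tuv".toList, "wxyz".toList]

-- the module-level table build of Source B (dict in insertion order)
def tableB : PySem.Dict Char (List Char) :=
  groupsB.zipIdx.foldl
    (fun acc gp =>
      gp.1.zipIdx.foldl
        (fun acc2 ck => acc2.insert ck.1 (List.replicate (ck.2 + 1) (Nat.digitChar (gp.2 + 2))))
        acc)
    (PySem.Dict.empty.insert ' ' ['0'])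

def stepB (st : List Char × Option Char) (c : Char) : List Char × Option Char :=
  match tableB.get? c with
  | none => st
  | some token =>
    ((if st.2 = token.head? then st.1 ++ [' '] ++ token else st.1 ++ token), token.getLast?)

def convert_alt (input : String) : String :=
  String.mk (input.toList.foldl stepB ([], none)).1

-- ===== PRECONDITION & SPEC =====
-- Pre_ excludes exactly the inputs containing an ASCII uppercase letter, on which
-- Python A raises ValueError (string.ascii_lowercase.index fails); A returns on all
-- other Dom inputs.
def Pre_convert (input : String) : Prop :=
  (input.toList.all (fun c => !(('A' ≤ c) && (c ≤ 'Z')))) = true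
instance (input : String) : Decidable (Pre_convert input) := by unfold Pre_convert; infer_instance

def pvWitness_convert : String := "a b"

-- A raises ValueError on inputs containing an ASCII uppercase letter; B skips such
-- characters (its table has no entry) and returns the conversion of the rest.
def Raises_convert (input : String) : Prop :=
  ∃ c ∈ input.toList, 'A' ≤ c ∧ c ≤ 'Z'
instance (input : String) : Decidable (Raises_convert input) := by unfold Raises_convert; infer_instance
def pvRaiseWitness_convert : String := "Hi"
def pvRaiseWitnessOut_convert : String := "444"

def Spec_convert (input : String) (out : String) : Prop := out = convert_alt input
instance (input : String) (out : String) : Decidable (Spec_convert input out) := by unfold Spec_convert; infer_instance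

-- ===== CLAIM (what is proved, stated in full; the proofs are below) =====
def Claim_equal_convert : Prop :=
  ∀ (input : String), Dom_convert input → Pre_convert input → Spec_convert input (convert input)

def Claim_raises_convert : Prop :=
  (∀ (input : String), Dom_convert input → Raises_convert input → ¬ Pre_convert input) ∧
  (Dom_convert (pvRaiseWitness_convert) ∧ Raises_convert (pvRaiseWitness_convert) ∧
   convert_alt (pvRaiseWitness_convert) = pvRaiseWitnessOut_convert)

-- ===== LEMMAS AND PROOFS =====

-- A's pause test 'output != "" and output[-1] == x' is exactly 'getLast? = some x'
lemma condA_iff (o : List Char) (x : Char) :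
    (o.length ≠ 0 ∧ PySem.List.pyGet? o ((o.length : Int) - 1) = some x) ↔ o.getLast? = some x := by
  cases o with
  | nil => simp [PySem.List.pyGet?]
  | cons a l =>
    have hlen : (((a :: l).length : Int) - 1) = ((l.length : Nat) : Int) := by rw [List.length_cons]; push_cast; omega
    rw [hlen, PySem.List.pyGet?_natCast, List.getLast?_eq_getElem?]
    simp

-- both programs append a pause iff the previous press equals the token's first press
lemma emit_sim (o t : List Char) (dc : Char) (hne : t ≠ []) (hhd : t.head? = some dc) :
    ((if o.getLast? = t.head? then o ++ [' '] ++ t else o ++ t), t.getLast?)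
    = ((if o.length ≠ 0 ∧ PySem.List.pyGet? o ((o.length : Int) - 1) = some dc
        then o ++ [' '] else o) ++ t,
       ((if o.length ≠ 0 ∧ PySem.List.pyGet? o ((o.length : Int) - 1) = some dc
         then o ++ [' '] else o) ++ t).getLast?) := by
  rw [hhd]
  by_cases h : o.getLast? = some dc
  · rw [if_pos h, if_pos ((condA_iff o dc).mpr h),
      List.getLast?_append_of_ne_nil (o ++ [' ']) hne, List.append_assoc]
  · rw [if_neg h, if_neg (fun hc => h ((condA_iff o dc).mp hc)),
      List.getLast?_append_of_ne_nil o hne]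

-- the keys of tableB are the space followed by the lowercase letters
lemma keys_tableB_eq : tableB.keys = [' '] ++ asciiLower := by decide

-- every key of tableB is ' ' or a lowercase letter
lemma keys_tableB : ∀ k ∈ (tableB).keys, k = ' ' ∨ k ∈ asciiLower := by
  intro k hk
  rw [keys_tableB_eq] at hk
  simpa using hk

lemma lower_isalpha_all : asciiLower.all PySem.Chars.isalpha = true := by decide

-- lowercase letters are alphabetic
lemma lower_isalpha : ∀ c ∈ asciiLower, PySem.Chars.isalpha c = true :=
  fun c hc => List.all_eq_true.mp lower_isalpha_all c hc

lemma table_vs_A_all : (asciiLower.all (fun c => tableB.get? c ==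
    some (match PySem.List.index? asciiLower c with
          | some i => Nat.digitChar (mappingA.getD i 0) :: innerA (mappingA.getD i 0) i
          | none => []))) = true := by decide

-- the table agrees with A's letters computation on every lowercase letter
lemma table_vs_A : ∀ c ∈ asciiLower,
    tableB.get? c = some
      (match PySem.List.index? asciiLower c with
       | some i => Nat.digitChar (mappingA.getD i 0) :: innerA (mappingA.getD i 0) i
       | none => []) := by
  intro c hc
  have h := List.all_eq_true.mp table_vs_A_all c hc
  simpa using h

lemma get?_tableB_none (c : Char) (hsp : c ≠ ' ') (hlow : c ∉ asciiLower) :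
    tableB.get? c = none := by
  by_contra h
  have hc : tableB.contains c = true := by
    rw [PySem.Dict.contains_eq_isSome_get?]
    cases hg : tableB.get? c with
    | none => exact absurd hg h
    | some v => simp
  have hk : c ∈ tableB.keys := (PySem.Dict.contains_iff_mem_keys _ _).mp hc
  rcases keys_tableB c hk with rfl | hm
  · exact hsp rfl
  · exact hlow hm

lemma step_sim (c : Char) (o : List Char) :
    stepB (o, o.getLast?) c = (stepA o c, (stepA o c).getLast?) := by
  by_cases hsp : c = ' '
  · subst hsp
    have htab : tableB.get? ' ' = some ['0'] := by decide
    have hA : stepA o ' ' =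
        (if o.length ≠ 0 ∧ PySem.List.pyGet? o ((o.length : Int) - 1) = some '0'
         then o ++ [' '] else o) ++ ['0'] := by
      simp [stepA]
    have hB : stepB (o, o.getLast?) ' ' =
        ((if o.getLast? = (['0'] : List Char).head? then o ++ [' '] ++ ['0'] else o ++ ['0']),
         (['0'] : List Char).getLast?) := by
      simp only [stepB, htab]
    rw [hA, hB]
    exact emit_sim o ['0'] '0' (by simp) rfl
  · by_cases hlow : c ∈ asciiLower
    · have halpha := lower_isalpha c hlow
      obtain ⟨i, hi⟩ : ∃ i, PySem.List.index? asciiLower c = some i := by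
        rcases hidx : PySem.List.index? asciiLower c with _ | i
        · exact absurd ((PySem.List.index?_eq_none_iff _ _).mp hidx) (by simpa using hlow)
        · exact ⟨i, rfl⟩
      have htab : tableB.get? c =
          some (Nat.digitChar (mappingA.getD i 0) :: innerA (mappingA.getD i 0) i) := by
        have h := table_vs_A c hlow
        rw [hi] at h
        exact h
      have hi' := hi
      rw [PySem.List.index?_eq_idxOf?] at hi'
      have hA : stepA o c =
          (if o.length ≠ 0 ∧ PySem.List.pyGet? o ((o.length : Int) - 1)
                = some (Nat.digitChar (mappingA.getD i 0))
           then o ++ [' '] else o)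
          ++ (Nat.digitChar (mappingA.getD i 0) :: innerA (mappingA.getD i 0) i) := by
        simp [stepA, hsp, halpha, hi']
      have hB : stepB (o, o.getLast?) c =
          ((if o.getLast? = (Nat.digitChar (mappingA.getD i 0) :: innerA (mappingA.getD i 0) i).head?
            then o ++ [' '] ++ (Nat.digitChar (mappingA.getD i 0) :: innerA (mappingA.getD i 0) i)
            else o ++ (Nat.digitChar (mappingA.getD i 0) :: innerA (mappingA.getD i 0) i)),
           (Nat.digitChar (mappingA.getD i 0) :: innerA (mappingA.getD i 0) i).getLast?) := by
        simp only [stepB, htab]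
      rw [hA, hB]
      exact emit_sim o _ (Nat.digitChar (mappingA.getD i 0)) (by simp) rfl
    · have hnone := get?_tableB_none c hsp hlow
      have hB : stepB (o, o.getLast?) c = (o, o.getLast?) := by
        simp only [stepB, hnone]
      have hA : stepA o c = o := by
        by_cases halpha : PySem.Chars.isalpha c = true
        · have hidx : PySem.List.index? asciiLower c = none :=
            (PySem.List.index?_eq_none_iff _ _).mpr hlow
          rw [PySem.List.index?_eq_idxOf?] at hidx
          simp [stepA, hsp, halpha, hidx]
        · have hf : PySem.Chars.isalpha c = false := by
            cases h : PySem.Chars.isalpha c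
            · rfl
            · exact absurd h halpha
          simp [stepA, hsp, hf]
      rw [hA, hB]

lemma fold_sim (l : List Char) (o : List Char) :
    l.foldl stepB (o, o.getLast?) = (l.foldl stepA o, (l.foldl stepA o).getLast?) := by
  induction l generalizing o with
  | nil => rfl
  | cons c l ih =>
    simp only [List.foldl_cons, step_sim c o]
    exact ih (stepA o c)

-- ===== VERDICT (by name: the statement is the Claim_ definition above) =====
theorem convert_spec : Claim_equal_convert := by
  intro input _ _
  unfold Spec_convert convert convert_alt
  have h0 : (([] : List Char), (none : Option Char)) = ([], ([] : List Char).getLast?) := rfl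
  rw [h0, fold_sim]

theorem convert_raises : Claim_raises_convert := by
  unfold Claim_raises_convert
  refine ⟨?_, by decide, ⟨'H', by decide, by decide, by decide⟩, ?_⟩
  · intro input _ ⟨c, hc, hup⟩ hpre
    have h := List.all_eq_true.mp hpre c hc
    rcases hup with ⟨h1, h2⟩
    simp [h1, h2] at h
  · have h1 : tableB.get? 'H' = none := by decide
    have h2 : tableB.get? 'i' = some ['4', '4', '4'] := by decide
    show String.mk (((pvRaiseWitness_convert).toList).foldl stepB ([], none)).1 = _
    have hl : (pvRaiseWitness_convert).toList = ['H', 'i'] := by decide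
    rw [hl]
    simp [stepB, h1, h2]
    rfl

-- self-check: B's port really returns the stated value at the raise witness
theorem convert_raises_witness :
    convert_alt pvRaiseWitness_convert = pvRaiseWitnessOut_convert :=
  (convert_raises).2.2.2
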